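-- pv_equiv track=rewrite | github.com/runarmod/adventofcode | 2015/5/1/main.py | checkAtleastThreeVowels
-- ===== SOURCE A (Python) =====
-- vowels = "aeiou"
--
-- def checkAtleastThreeVowels(line):
--     numberOfUniqueVowels = 0
--     vowelsCopy = vowels
--     for letter in line:
--         if letter in vowelsCopy:
--             numberOfUniqueVowels += 1
--         if numberOfUniqueVowels >= 3:
--             return True
--
--     return False
-- ===== SOURCE B (Python) =====
-- vowels = "aeiou"
--
-- def checkAtleastThreeVowels(line):
--     return sum(line.count(v) for v in vowels) >= 3
-- ===== Notes on version B (the rewrite author's own statement) =====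
-- stated objective: idiomatic
-- what changed: Replaces the early-exiting per-character membership loop with a one-liner summing line.count(v) over the five vowels and comparing the total to 3.
import Mathlib
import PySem

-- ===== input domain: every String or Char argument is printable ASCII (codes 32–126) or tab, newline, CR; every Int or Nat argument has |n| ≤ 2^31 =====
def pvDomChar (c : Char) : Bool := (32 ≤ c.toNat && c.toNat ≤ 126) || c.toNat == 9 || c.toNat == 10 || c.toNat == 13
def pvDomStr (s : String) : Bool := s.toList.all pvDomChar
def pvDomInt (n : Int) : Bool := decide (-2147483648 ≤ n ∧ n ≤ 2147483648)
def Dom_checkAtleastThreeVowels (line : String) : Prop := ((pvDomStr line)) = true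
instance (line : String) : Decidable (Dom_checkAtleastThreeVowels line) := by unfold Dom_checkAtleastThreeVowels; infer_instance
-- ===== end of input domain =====

-- B replaces A's early-exiting per-character membership loop with a per-vowel count-and-sum one-liner (idiomatic one-liner; drops the early exit).

-- ===== PORT A =====
-- vowels = "aeiou"
def pvVowels : String := "aeiou"

-- the for-loop of A with its accumulator `numberOfUniqueVowels` and the early `return True`
def pvLoopA : List Char → Int → Bool
  | [], _ => false
  | letter :: rest, n =>
    let n' := if pvVowels.toList.contains letter then n + 1 else n
    if n' ≥ 3 then true else pvLoopA rest n'

def checkAtleastThreeVowels (line : String) : Bool :=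
  pvLoopA line.toList 0

-- ===== PORT B =====
-- sum(line.count(v) for v in vowels) >= 3
def checkAtleastThreeVowels_alt (line : String) : Bool :=
  decide ((pvVowels.toList.map (fun v => (PySem.Str.count line (String.ofList [v]) : Int))).sum ≥ 3)

-- ===== PRECONDITION & SPEC =====
def Spec_checkAtleastThreeVowels (line : String) (out : Bool) : Prop := out = checkAtleastThreeVowels_alt line
instance (line : String) (out : Bool) : Decidable (Spec_checkAtleastThreeVowels line out) := by unfold Spec_checkAtleastThreeVowels; infer_instance

-- ===== CLAIM (what is proved, stated in full; the proofs are below) =====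
def Claim_equal_checkAtleastThreeVowels : Prop := ∀ (line : String), Dom_checkAtleastThreeVowels line → Spec_checkAtleastThreeVowels line (checkAtleastThreeVowels line)

-- ===== LEMMAS AND PROOFS =====

-- Python's str.count with a one-character needle is the character count
theorem chars_count_go_singleton (c : Char) (l : List Char) (fuel : Nat) (acc : Nat)
    (h : l.length ≤ fuel) :
    PySem.Chars.count.go [c] fuel l acc = acc + l.count c := by
  induction l generalizing fuel acc with
  | nil => cases fuel <;> simp [PySem.Chars.count.go]
  | cons hd tl ih =>
    cases fuel with
    | zero => simp at h
    | succ f =>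
      simp only [List.length_cons, Nat.succ_le_succ_iff] at h
      by_cases hc : hd = c
      · subst hc
        simp [PySem.Chars.count.go, List.isPrefixOf, ih f (acc + 1) h]
        omega
      · simp [PySem.Chars.count.go, List.isPrefixOf, hc, ih f acc h, Ne.symm hc]

theorem chars_count_singleton (s : List Char) (c : Char) :
    PySem.Chars.count s [c] = s.count c := by
  simp [PySem.Chars.count, chars_count_go_singleton c s s.length 0 le_rfl]

-- summing each vowel's count equals counting the characters that are vowels
theorem sum_counts_eq_countP (l : List Char) :
    (pvVowels.toList.map (fun v => (l.count v : Int))).sum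
      = (l.countP (fun c => pvVowels.toList.contains c) : Int) := by
  induction l with
  | nil => simp
  | cons hd tl ih =>
    simp only [List.count_cons, List.countP_cons] at *
    by_cases h : pvVowels.toList.contains hd
    · have : hd = 'a' ∨ hd = 'e' ∨ hd = 'i' ∨ hd = 'o' ∨ hd = 'u' := by
        simpa [pvVowels, List.contains_eq_mem] using h
      rcases this with h1 | h1 | h1 | h1 | h1 <;> subst h1 <;>
        simp_all [pvVowels] <;> omega
    · have ha : ¬ ('a' = hd) := by rintro rfl; simp [pvVowels] at h
      have he : ¬ ('e' = hd) := by rintro rfl; simp [pvVowels] at h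
      have hi : ¬ ('i' = hd) := by rintro rfl; simp [pvVowels] at h
      have ho : ¬ ('o' = hd) := by rintro rfl; simp [pvVowels] at h
      have hu : ¬ ('u' = hd) := by rintro rfl; simp [pvVowels] at h
      simp_all [pvVowels]

-- A's early-exiting loop computes "accumulator + number of vowels ≥ 3" (for accumulators below 3)
theorem pvLoopA_eq (l : List Char) (n : Int) (hn : n < 3) :
    pvLoopA l n = decide (n + (l.countP (fun c => pvVowels.toList.contains c) : Int) ≥ 3) := by
  induction l generalizing n with
  | nil => simp [pvLoopA]; omega
  | cons hd tl ih =>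
    rw [pvLoopA, List.countP_cons]
    by_cases h : pvVowels.toList.contains hd
    · rw [if_pos h, if_pos h]
      by_cases h3 : n + 1 ≥ 3
      · rw [if_pos h3]
        have : (3 : Int) ≤ n + (↑(tl.countP fun c => pvVowels.toList.contains c) + 1) := by
          have : (0 : Int) ≤ (tl.countP fun c => pvVowels.toList.contains c : Int) := by
            exact_mod_cast Nat.zero_le _
          omega
        exact (decide_eq_true this).symm
      · rw [if_neg h3, ih (n + 1) (by omega)]
        have harith : n + 1 + (tl.countP (fun c => pvVowels.toList.contains c) : Int)
            = n + ((tl.countP (fun c => pvVowels.toList.contains c) : Int) + 1) := by ring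
        rw [harith]
        push_cast
        rfl
    · rw [if_neg h, if_neg h, if_neg (by omega : ¬ n ≥ 3), ih n hn]
      norm_num

-- ===== VERDICT (by name: the statement is the Claim_ definition above) =====
theorem checkAtleastThreeVowels_spec : Claim_equal_checkAtleastThreeVowels := by
  intro line _
  unfold Spec_checkAtleastThreeVowels checkAtleastThreeVowels checkAtleastThreeVowels_alt
  rw [pvLoopA_eq line.toList 0 (by omega)]
  have : ∀ v : Char, PySem.Str.count line (String.ofList [v]) = line.toList.count v := by
    intro v
    rw [PySem.Str.count_eq, String.toList_ofList, chars_count_singleton]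
  simp only [this, sum_counts_eq_countP]
  simp
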